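-- pv_equiv track=rewrite | github.com/mulle-cc/roam-code | src/roam/commands/cmd_agent_plan.py | _phase_map
-- ===== SOURCE A (Python) =====
-- def _phase_map(partition_ids: list[int], prereqs: dict[int, set[int]]) -> dict[int, int]:
--     """Assign execution phases based on dependency prerequisites."""
--     remaining = {pid: set(prereqs.get(pid, set())) for pid in partition_ids}
--     unscheduled = set(partition_ids)
--     phase = 1
--     phases: dict[int, int] = {}
--
--     while unscheduled:
--         ready = sorted(pid for pid in unscheduled if not remaining[pid])
--         if not ready:
--             # Cycle fallback: choose deterministic single partition and continue.
--             ready = [min(unscheduled)]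
--
--         ready_set = set(ready)
--         for pid in ready:
--             phases[pid] = phase
--         unscheduled -= ready_set
--         for pid in unscheduled:
--             remaining[pid] -= ready_set
--         phase += 1
--
--     return phases
-- ===== SOURCE B (Python) =====
-- def _phase_map(partition_ids: list[int], prereqs: dict[int, set[int]]) -> dict[int, int]:
--     """Assign execution phases based on dependency prerequisites."""
--     # Kahn-style layered topological sort: per-node remaining-prerequisite COUNTS plus a
--     # reverse-adjacency (dependents) index; scheduling a node decrements only its dependents,
--     # and a node enters the next ready layer the moment its count hits zero -- no per-round
--     # rescan of the pending set.  Ids are sorted once; the cycle fallback takes the first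
--     # still-unscheduled id from that sorted order via a monotone pointer.
--     order = sorted(set(partition_ids))
--     nodes = set(order)
--     count: dict[int, int] = {}
--     dependents: dict[int, list[int]] = {p: [] for p in order}
--     for p in order:
--         deps = prereqs.get(p, set())
--         count[p] = len(deps)
--         for d in deps:
--             if d in nodes:
--                 dependents[d].append(p)
--     phases: dict[int, int] = {}
--     ready = [p for p in order if count[p] == 0]
--     phase = 1
--     i = 0  # order[i:] still contains every unscheduled id (min unscheduled never decreases)
--     while len(phases) < len(order):
--         if not ready:
--             while order[i] in phases:
--                 i += 1
--             ready = [order[i]]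
--         nxt = []
--         for p in ready:
--             phases[p] = phase
--             for q in dependents[p]:
--                 count[q] -= 1
--                 if count[q] == 0 and q not in phases:
--                     nxt.append(q)
--         ready = sorted(nxt)
--         phase += 1
--     return phases
-- ===== Notes on version B (the rewrite author's own statement) =====
-- stated objective: faster
-- what changed: B replaces A's round-based rescanning (each round: re-filter every pending node's residual prereq set, re-sort, set-subtract every pending node) by a Kahn-style layered topological sort: a reverse-adjacency dependents index and per-node remaining-prerequisite counts built once; scheduling a node decrements only its dependents' counts and a node enters the next layer exactly when its count hits zero, with the cycle fallback served by a monotone pointer into the once-sorted id list.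
import Mathlib
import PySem

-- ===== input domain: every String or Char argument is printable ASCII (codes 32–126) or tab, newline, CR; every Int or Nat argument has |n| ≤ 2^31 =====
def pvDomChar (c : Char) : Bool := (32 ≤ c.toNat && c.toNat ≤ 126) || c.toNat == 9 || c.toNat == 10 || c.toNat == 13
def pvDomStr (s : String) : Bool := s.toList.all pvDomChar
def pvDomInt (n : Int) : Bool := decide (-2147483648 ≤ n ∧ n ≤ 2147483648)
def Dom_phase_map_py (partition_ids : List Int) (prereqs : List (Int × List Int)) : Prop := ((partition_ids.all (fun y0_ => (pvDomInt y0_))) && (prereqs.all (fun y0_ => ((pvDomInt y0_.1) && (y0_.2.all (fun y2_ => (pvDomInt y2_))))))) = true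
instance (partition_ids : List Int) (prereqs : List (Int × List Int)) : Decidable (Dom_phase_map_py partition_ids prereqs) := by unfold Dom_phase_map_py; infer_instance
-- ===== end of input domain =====

-- B replaces A's per-round rescanning of every pending node by a Kahn-style layered
-- topological sort: remaining-prerequisite counts plus a reverse-adjacency (dependents)
-- index built once; scheduling decrements only the dependents' counts, a node enters the
-- next layer exactly when its count hits zero, and the cycle fallback is served by a
-- monotone pointer into the once-sorted id list; objective: faster (asymptotic on e.g.
-- chains). Same return value; neither version observably mutates its arguments.

-- ===== PORT A =====
-- while-loop of A; fuel = |unscheduled| at entry (each round schedules ≥ 1 id, so it never runs out)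
def phaseLoopA (prereqs : List (Int × List Int)) :
    Nat → PySem.Dict Int (PySem.Set Int) → PySem.Set Int → Int → PySem.Dict Int Int → PySem.Dict Int Int
  | 0, _, _, _, phases => phases
  | fuel+1, remaining, unscheduled, phase, phases =>
    if unscheduled.isEmpty then phases
    else
      -- ready = sorted(pid for pid in unscheduled if not remaining[pid])  (keys of remaining ⊇ unscheduled, so getD's default is never read)
      let ready0 := PySem.List.sorted (unscheduled.filter (fun pid => (remaining.getD pid []).isEmpty)) (fun x => x) false
      -- cycle fallback: ready = [min(unscheduled)]
      let ready := if ready0.isEmpty then (PySem.List.min? unscheduled (fun x => x)).elim [] (fun m => [m]) else ready0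
      let readySet := PySem.Set.ofList ready
      let phases' := ready.foldl (fun d pid => d.insert pid phase) phases
      let unscheduled' := PySem.Set.diff unscheduled readySet
      let remaining' := unscheduled'.foldl (fun d pid => d.modify pid [] (fun s => PySem.Set.diff s readySet)) remaining
      phaseLoopA prereqs fuel remaining' unscheduled' (phase+1) phases'

def phase_map_py (partition_ids : List Int) (prereqs : List (Int × List Int)) : List (Int × Int) :=
  let remaining : PySem.Dict Int (PySem.Set Int) :=
    partition_ids.foldl
      (fun d pid => d.insert pid (PySem.Set.ofList ((PySem.Dict.mk prereqs).getD pid []))) PySem.Dict.empty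
  let unscheduled : PySem.Set Int := PySem.Set.ofList partition_ids
  (phaseLoopA prereqs unscheduled.length remaining unscheduled 1 PySem.Dict.empty).items

-- ===== PORT B =====
-- while-loop of B; fuel = |order| (each round schedules ≥ 1 new id).  State: count,
-- ready (this round's layer), suffix = order[i:] (the monotone fallback pointer), phase, phases.
-- 'while order[i] in phases: i += 1' is the dropWhile; 'order[i]' is its head (exact here:
-- under the loop invariant an unscheduled id exists in the suffix, so the index never overruns).
def phaseLoopB (dependents : PySem.Dict Int (List Int)) (total : Nat) :
    Nat → PySem.Dict Int Int → List Int → List Int → Int → PySem.Dict Int Int → PySem.Dict Int Int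
  | 0, _, _, _, _, phases => phases
  | fuel+1, count, ready, suffix, phase, phases =>
    if phases.size < total then
      let rs := if ready.isEmpty then
          (let rest := suffix.dropWhile (fun p => phases.contains p); ((rest.take 1 : List Int), rest))
        else (ready, suffix)
      -- for p in ready: phases[p] = phase; for q in dependents[p]: count[q] -= 1; if count[q]==0 and q not in phases: nxt.append(q)
      let st := rs.1.foldl
        (fun (st : PySem.Dict Int Int × PySem.Dict Int Int × List Int) p =>
          let phs := st.1.insert p phase
          let cn := (dependents.getD p []).foldl
            (fun (cn : PySem.Dict Int Int × List Int) q =>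
              let c := cn.1.modify q 0 (fun v => v - 1)
              if c.getD q 0 == 0 && !(phs.contains q) then (c, cn.2 ++ [q]) else (c, cn.2))
            (st.2.1, st.2.2)
          (phs, cn.1, cn.2))
        (phases, count, ([] : List Int))
      phaseLoopB dependents total fuel st.2.1 (PySem.List.sorted st.2.2 (fun x => x) false) rs.2 (phase+1) st.1
    else phases

def phase_map_py_alt (partition_ids : List Int) (prereqs : List (Int × List Int)) : List (Int × Int) :=
  let order := PySem.List.sorted (PySem.Set.ofList partition_ids) (fun x => x) false
  let nodes := PySem.Set.ofList order
  -- dependents = {p: [] for p in order}; then one pass filling count and dependents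
  let dep0 : PySem.Dict Int (List Int) := order.foldl (fun d p => d.insert p []) PySem.Dict.empty
  let cd := order.foldl
    (fun (cd : PySem.Dict Int Int × PySem.Dict Int (List Int)) p =>
      let deps : PySem.Set Int := PySem.Set.ofList ((PySem.Dict.mk prereqs).getD p [])
      let count := cd.1.insert p (PySem.Set.len deps)
      let dm := deps.foldl
        (fun dd d => if PySem.Set.contains nodes d then dd.modify d [] (fun l => l ++ [p]) else dd) cd.2
      (count, dm))
    (PySem.Dict.empty, dep0)
  let ready := order.filter (fun p => cd.1.getD p 0 == 0)
  (phaseLoopB cd.2 order.length order.length cd.1 ready order 1 PySem.Dict.empty).items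

-- ===== PRECONDITION & SPEC =====
def Spec_phase_map_py (partition_ids : List Int) (prereqs : List (Int × List Int)) (out : List (Int × Int)) : Prop := out = phase_map_py_alt partition_ids prereqs
instance (partition_ids : List Int) (prereqs : List (Int × List Int)) (out : List (Int × Int)) : Decidable (Spec_phase_map_py partition_ids prereqs out) := by unfold Spec_phase_map_py; infer_instance

-- ===== CLAIM (what is proved, stated in full; the proofs are below) =====
def Claim_equal_phase_map_py : Prop := ∀ (partition_ids : List Int) (prereqs : List (Int × List Int)), Dom_phase_map_py partition_ids prereqs → Spec_phase_map_py partition_ids prereqs (phase_map_py partition_ids prereqs)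

-- ===== LEMMAS AND PROOFS =====

-- deps(x): the prerequisite set of x; rem(phases, x): its not-yet-scheduled part
def pvDeps (prereqs : List (Int × List Int)) (x : Int) : PySem.Set Int :=
  PySem.Set.ofList ((PySem.Dict.mk prereqs).getD x [])
def pvRem (prereqs : List (Int × List Int)) (phases : PySem.Dict Int Int) (x : Int) : PySem.Set Int :=
  (pvDeps prereqs x).filter (fun q => !(phases.contains q))

lemma pv_min?_eq_head {xs : List Int} {m : Int} (hm : m ∈ xs) (hmin : ∀ y ∈ xs, y ≠ m → m < y) :
    PySem.List.min? xs (fun x => x) = some m := by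
  cases h : PySem.List.min? xs (fun x => x) with
  | none => rw [PySem.List.min?_eq_none_iff] at h; simp [h] at hm
  | some m0 =>
    have h1 := PySem.List.min?_mem h
    have h2 := PySem.List.min?_isMin h m hm
    by_cases e : m0 = m
    · rw [e]
    · exact absurd h2 (not_le.mpr (hmin m0 h1 e))

lemma pv_getD_foldl_insert_not_mem {ν : Type} (v : PySem.Dict Int ν → Int → ν) (dflt : ν)
    (l : List Int) (d : PySem.Dict Int ν) (p : Int) (hp : p ∉ l) :
    (l.foldl (fun d x => d.insert x (v d x)) d).getD p dflt = d.getD p dflt := by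
  induction l generalizing d with
  | nil => rfl
  | cons x l ih =>
    have hx : p ≠ x := fun h => hp (h ▸ List.mem_cons_self)
    have hl : p ∉ l := fun h => hp (List.mem_cons_of_mem _ h)
    simp only [List.foldl_cons]
    rw [ih _ hl, PySem.Dict.getD_insert, if_neg hx]

lemma pv_getD_foldl_insert_fun {ν : Type} (g : Int → ν) (dflt : ν) (l : List Int) (d : PySem.Dict Int ν)
    (p : Int) (hp : p ∈ l) :
    (l.foldl (fun d x => d.insert x (g x)) d).getD p dflt = g p := by
  induction l generalizing d with
  | nil => simp at hp
  | cons x l ih =>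
    simp only [List.foldl_cons]
    by_cases e : p ∈ l
    · exact ih _ e
    · have hx : p = x := (List.mem_cons.mp hp).resolve_right e
      rw [pv_getD_foldl_insert_not_mem (fun _ y => g y) dflt l _ p e, PySem.Dict.getD_insert, if_pos hx, hx]

lemma pv_getD_foldl_modify_nodup (f : PySem.Set Int → PySem.Set Int) (l : List Int)
    (d : PySem.Dict Int (PySem.Set Int)) (p : Int) (hl : l.Nodup) (hp : p ∈ l) :
    (l.foldl (fun d x => d.modify x [] f) d).getD p [] = f (d.getD p []) := by
  induction l generalizing d with
  | nil => simp at hp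
  | cons x l ih =>
    rcases List.nodup_cons.mp hl with ⟨hxl, hln⟩
    simp only [List.foldl_cons]
    by_cases e : p ∈ l
    · rw [ih _ hln e]
      have hx : p ≠ x := fun h => hxl (h ▸ e)
      rw [PySem.Dict.modify, PySem.Dict.getD_insert, if_neg hx]
    · have hx : p = x := (List.mem_cons.mp hp).resolve_right e
      simp only [PySem.Dict.modify]
      rw [pv_getD_foldl_insert_not_mem (fun d y => f (d.getD y [])) [] l _ p e]
      rw [PySem.Dict.getD_insert, if_pos hx, hx]

lemma pv_contains_eq (s : PySem.Set Int) (q : Int) :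
    PySem.Set.contains s q = decide (q ∈ s) := by
  simp [PySem.Set.contains, List.contains_eq_mem]

-- contains of a phases dict after inserting every element of a list
lemma pv_contains_foldl_insert (l : List Int) (d : PySem.Dict Int Int) (phase : Int) (x : Int) :
    ((l.foldl (fun d p => d.insert p phase) d).contains x) = (d.contains x || decide (x ∈ l)) := by
  induction l generalizing d with
  | nil => simp
  | cons p l ih =>
    simp only [List.foldl_cons]
    rw [ih]
    simp [PySem.Dict.contains_eq_decide_mem_keys, PySem.Dict.mem_keys_insert, List.mem_cons,
      Bool.or_assoc, Bool.or_comm, Bool.or_left_comm]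

-- size of a phases dict after inserting fresh distinct keys
lemma pv_size_foldl_insert (l : List Int) (d : PySem.Dict Int Int) (phase : Int)
    (hfresh : ∀ p ∈ l, d.contains p = false) (hnd : l.Nodup) :
    (l.foldl (fun d p => d.insert p phase) d).size = d.size + l.length := by
  induction l generalizing d with
  | nil => simp
  | cons p l ih =>
    rcases List.nodup_cons.mp hnd with ⟨hpl, hln⟩
    simp only [List.foldl_cons]
    rw [ih _ ?_ hln]
    · rw [PySem.Dict.size_insert, if_neg (by simp [hfresh p List.mem_cons_self])]
      simp [List.length_cons]; omega
    · intro q hq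
      rw [PySem.Dict.contains_eq_decide_mem_keys, decide_eq_false_iff_not, PySem.Dict.mem_keys_insert]
      rintro (rfl | hk)
      · exact hpl hq
      · have := hfresh q (List.mem_cons_of_mem _ hq)
        rw [PySem.Dict.contains_eq_decide_mem_keys, decide_eq_false_iff_not] at this
        exact this hk

-- two Nodup lists count each other's members equally
lemma pv_cross_count (l1 l2 : List Int) (h1 : l1.Nodup) (h2 : l2.Nodup) :
    (l1.filter (fun x => decide (x ∈ l2))).length = (l2.filter (fun x => decide (x ∈ l1))).length := by
  apply List.Perm.length_eq
  rw [List.perm_ext_iff_of_nodup (h1.filter _) (h2.filter _)]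
  intro a
  simp only [List.mem_filter, decide_eq_true_eq]
  exact and_comm

-- splitting a list's length by a predicate
lemma pv_filter_split (l : List Int) (p : Int → Bool) :
    (l.filter p).length + (l.filter (fun x => !p x)).length = l.length := by
  induction l with
  | nil => rfl
  | cons x l ih =>
    by_cases h : p x = true
    · simp [h]; omega
    · simp only [Bool.not_eq_true] at h
      simp [h]; omega

-- a Nodup list whose members all equal p, containing p, is [p]
lemma pv_eq_singleton (l : List Int) (p : Int) (hnd : l.Nodup) (hp : p ∈ l)
    (hall : ∀ r ∈ l, r = p) : l = [p] := by
  cases l with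
  | nil => simp at hp
  | cons x t =>
    have hx : x = p := hall x List.mem_cons_self
    subst hx
    cases t with
    | nil => rfl
    | cons y t =>
      have hy : y = x := hall y (by simp)
      rcases List.nodup_cons.mp hnd with ⟨hxn, _⟩
      exact absurd (hy ▸ List.mem_cons_self) hxn

-- proof-only names for the two fold bodies of phaseLoopB (definitionally the port's lambdas)
def pvInnerStep (phs : PySem.Dict Int Int) (cn : PySem.Dict Int Int × List Int) (q : Int) :
    PySem.Dict Int Int × List Int :=
  let c := cn.1.modify q 0 (fun v => v - 1)
  if c.getD q 0 == 0 && !(phs.contains q) then (c, cn.2 ++ [q]) else (c, cn.2)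

def pvOuterStep (dependents : PySem.Dict Int (List Int)) (phase : Int)
    (st : PySem.Dict Int Int × PySem.Dict Int Int × List Int) (p : Int) :
    PySem.Dict Int Int × PySem.Dict Int Int × List Int :=
  let phs := st.1.insert p phase
  let cn := (dependents.getD p []).foldl (pvInnerStep phs) (st.2.1, st.2.2)
  (phs, cn.1, cn.2)

-- getD of the count dict after the inner decrement fold, and the nxt list it builds
lemma pv_inner_fold (L : List Int) (phs : PySem.Dict Int Int) (cnt : PySem.Dict Int Int)
    (nxt : List Int) (hL : L.Nodup) :
    (∀ x, ((L.foldl (pvInnerStep phs) (cnt, nxt)).1).getD x 0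
      = cnt.getD x 0 - (if x ∈ L then 1 else 0)) ∧
    (∀ x, x ∈ (L.foldl (pvInnerStep phs) (cnt, nxt)).2
      ↔ (x ∈ nxt ∨ (x ∈ L ∧ cnt.getD x 0 = 1 ∧ phs.contains x = false))) ∧
    (nxt.Nodup → (∀ x ∈ nxt, cnt.getD x 0 ≤ 0) →
      ((L.foldl (pvInnerStep phs) (cnt, nxt)).2).Nodup) := by
  induction L generalizing cnt nxt with
  | nil => exact ⟨by simp, by simp, fun h _ => h⟩
  | cons q L ih =>
    rcases List.nodup_cons.mp hL with ⟨hqL, hLn⟩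
    have hc : ∀ x, (cnt.modify q 0 (fun v => v - 1)).getD x 0
        = cnt.getD x 0 - (if x = q then 1 else 0) := by
      intro x
      rw [PySem.Dict.getD_modify]
      split_ifs with h
      · rw [h]
      · omega
    simp only [List.foldl_cons]
    by_cases hcond : ((cnt.modify q 0 (fun v => v - 1)).getD q 0 == 0 && !(phs.contains q)) = true
    · have hstep : pvInnerStep phs (cnt, nxt) q = (cnt.modify q 0 (fun v => v - 1), nxt ++ [q]) := by
        simp only [pvInnerStep, hcond, if_true]
      rw [hstep]
      obtain ⟨ih1, ih2, ih3⟩ := ih (cnt.modify q 0 (fun v => v - 1)) (nxt ++ [q]) hLn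
      have hq1 : cnt.getD q 0 = 1 := by
        have := (Bool.and_eq_true _ _).mp hcond |>.1
        rw [beq_iff_eq, hc q, if_pos rfl] at this; omega
      have hqphs : phs.contains q = false := by
        have := (Bool.and_eq_true _ _).mp hcond |>.2
        simpa using this
      refine ⟨?_, ?_, ?_⟩
      · intro x
        rw [ih1 x, hc x]
        by_cases e : x = q
        · subst e; simp [hqL]
        · simp [e, List.mem_cons]
      · intro x
        rw [ih2 x]
        by_cases e : x = q
        · subst e
          simp [hq1, hqphs, hc]
        · have hxc : (cnt.modify q 0 (fun v => v - 1)).getD x 0 = cnt.getD x 0 := by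
            rw [hc x, if_neg e]; omega
          simp [List.mem_append, e, hxc, List.mem_cons]
      · intro hnd hneg
        apply ih3
        · have hqn : q ∉ nxt := fun h => by have := hneg q h; omega
          rw [List.nodup_append]
          refine ⟨hnd, List.nodup_singleton _, ?_⟩
          intro a ha b hb
          rw [List.mem_singleton] at hb
          subst hb
          exact fun h => hqn (h ▸ ha)
        · intro x hx
          rcases List.mem_append.mp hx with h | h
          · have := hneg x h
            rw [hc x]; split_ifs <;> omega
          · rw [List.mem_singleton] at h; subst h
            rw [hc x, if_pos rfl]; omega
    · have hstep : pvInnerStep phs (cnt, nxt) q = (cnt.modify q 0 (fun v => v - 1), nxt) := by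
        simp only [pvInnerStep]
        rw [if_neg hcond]
      rw [hstep]
      obtain ⟨ih1, ih2, ih3⟩ := ih (cnt.modify q 0 (fun v => v - 1)) nxt hLn
      have hqfail : ¬(cnt.getD q 0 = 1 ∧ phs.contains q = false) := by
        intro ⟨h1, h2⟩
        apply hcond
        rw [Bool.and_eq_true]
        constructor
        · rw [beq_iff_eq, hc q, if_pos rfl, h1]
          omega
        · simp [h2]
      refine ⟨?_, ?_, ?_⟩
      · intro x
        rw [ih1 x, hc x]
        by_cases e : x = q
        · subst e; simp [hqL]
        · simp [e, List.mem_cons]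
      · intro x
        rw [ih2 x]
        by_cases e : x = q
        · subst e
          simp only [List.mem_cons, true_or, true_and]
          constructor
          · rintro (h | ⟨hm, _, _⟩)
            · exact Or.inl h
            · exact absurd hm hqL
          · rintro (h | ⟨h1, h2⟩)
            · exact Or.inl h
            · exact absurd ⟨h1, h2⟩ hqfail
        · have hxc : (cnt.modify q 0 (fun v => v - 1)).getD x 0 = cnt.getD x 0 := by
            rw [hc x, if_neg e]; omega
          simp [e, hxc, List.mem_cons]
      · intro hnd hneg
        apply ih3 hnd
        intro x hx
        have := hneg x hx
        rw [hc x]; split_ifs <;> omega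

-- membership in PySem.Set.diff
lemma pv_mem_diff (s t : PySem.Set Int) (x : Int) : x ∈ PySem.Set.diff s t ↔ (x ∈ s ∧ x ∉ t) := by
  simp [PySem.Set.diff, List.mem_filter]

-- pvRem is Nodup
lemma pv_rem_nodup (prereqs : List (Int × List Int)) (phases : PySem.Dict Int Int) (x : Int) :
    (pvRem prereqs phases x).Nodup := (PySem.Set.nodup_ofList _).filter _

-- count value written as the length of the not-yet-in-S part of the remaining set
lemma pv_cnt_as_filter (S rem : List Int) (hS : S.Nodup) (hrem : rem.Nodup) :
    (rem.length : Int) - (S.countP (fun q => decide (q ∈ rem)) : Int)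
      = ((rem.filter (fun r => !decide (r ∈ S))).length : Int) := by
  rw [List.countP_eq_length_filter, pv_cross_count S rem hS hrem]
  have := pv_filter_split rem (fun r => decide (r ∈ S))
  omega

-- one full round of B's scheduling fold, relative to A's round data
lemma pv_outer_fold_aux
    (prereqs : List (Int × List Int)) (N : PySem.Set Int) (O : List Int) (D : PySem.Dict Int (List Int))
    (hON : ∀ x, x ∈ O ↔ x ∈ N) (hOnd : O.Nodup)
    (hD : ∀ d, d ∈ N → D.getD d [] = O.filter (fun p => decide (d ∈ pvDeps prereqs p)))
    (uns : PySem.Set Int) (hUN : ∀ p ∈ uns, p ∈ N)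
    (phases0 : PySem.Dict Int Int)
    (hsched : ∀ p, phases0.contains p = true ↔ (p ∈ N ∧ p ∉ uns))
    (R : List Int) (hRnd : R.Nodup) (hRuns : ∀ p ∈ R, p ∈ uns)
    (hRC : (∀ x, x ∈ R ↔ x ∈ uns ∧ pvRem prereqs phases0 x = [])
           ∨ (∃ m, R = [m] ∧ ∀ x ∈ uns, pvRem prereqs phases0 x ≠ []))
    (phase : Int) :
    ∀ (T S : List Int) (cnt : PySem.Dict Int Int) (nxt : List Int),
      R = S ++ T →
      (∀ x ∈ uns, cnt.getD x 0 = ((pvRem prereqs phases0 x).length : Int)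
          - (S.countP (fun q => decide (q ∈ pvRem prereqs phases0 x)) : Int)) →
      (∀ x, x ∈ nxt ↔ (x ∈ uns ∧ x ∉ R ∧ pvRem prereqs phases0 x ≠ [] ∧
          ∀ r ∈ pvRem prereqs phases0 x, r ∈ S)) →
      nxt.Nodup →
      (T.foldl (pvOuterStep D phase) (S.foldl (fun d p => d.insert p phase) phases0, cnt, nxt)).1
          = R.foldl (fun d p => d.insert p phase) phases0
      ∧ (∀ x ∈ uns, ((T.foldl (pvOuterStep D phase) (S.foldl (fun d p => d.insert p phase) phases0, cnt, nxt)).2.1).getD x 0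
          = ((pvRem prereqs phases0 x).length : Int)
            - (R.countP (fun q => decide (q ∈ pvRem prereqs phases0 x)) : Int))
      ∧ (∀ x, x ∈ (T.foldl (pvOuterStep D phase) (S.foldl (fun d p => d.insert p phase) phases0, cnt, nxt)).2.2
          ↔ (x ∈ uns ∧ x ∉ R ∧ pvRem prereqs phases0 x ≠ [] ∧
              ∀ r ∈ pvRem prereqs phases0 x, r ∈ R))
      ∧ ((T.foldl (pvOuterStep D phase) (S.foldl (fun d p => d.insert p phase) phases0, cnt, nxt)).2.2).Nodup := by
  intro T
  induction T with
  | nil =>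
    intro S cnt nxt hRS hcnt hnxt hnd
    rw [List.append_nil] at hRS
    subst hRS
    exact ⟨rfl, hcnt, hnxt, hnd⟩
  | cons p T' ih =>
    intro S cnt nxt hRS hcnt hnxt hnd
    -- basic facts about p and S
    have hpR : p ∈ R := by rw [hRS]; simp
    have hpuns : p ∈ uns := hRuns p hpR
    have hpN : p ∈ N := hUN p hpuns
    have hpO : p ∈ O := (hON p).mpr hpN
    have hSnd : S.Nodup ∧ p ∉ S ∧ p ∉ T' := by
      have := hRS ▸ hRnd
      rw [List.nodup_append] at this
      obtain ⟨h1, h2, h3⟩ := this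
      rcases List.nodup_cons.mp h2 with ⟨hpT, _⟩
      refine ⟨h1, fun hp => ?_, hpT⟩
      exact h3 p hp p (List.mem_cons_self) rfl
    obtain ⟨hSnd', hpS, hpT'⟩ := hSnd
    have hSR : ∀ q ∈ S, q ∈ R := fun q hq => by rw [hRS]; exact List.mem_append_left _ hq
    -- the dependents list of p
    set L := D.getD p [] with hLdef
    have hL : L = O.filter (fun x => decide (p ∈ pvDeps prereqs x)) := hD p hpN
    have hLnd : L.Nodup := hL ▸ hOnd.filter _
    have hmemL : ∀ x, x ∈ L ↔ (x ∈ O ∧ p ∈ pvDeps prereqs x) := by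
      intro x; rw [hL]; simp [List.mem_filter]
    -- p is unscheduled, so p ∈ rem(x) ↔ p ∈ deps(x)
    have hc0p : phases0.contains p = false := by
      rw [Bool.eq_false_iff]
      intro hT
      exact ((hsched p).mp hT).2 hpuns
    have hpRem : ∀ x, p ∈ pvRem prereqs phases0 x ↔ p ∈ pvDeps prereqs x := by
      intro x
      unfold pvRem
      simp [List.mem_filter, hc0p]
    -- contains of the phases dict after inserting S and p
    have hphsS : ∀ x, ((S.foldl (fun d q => d.insert q phase) phases0).insert p phase).contains x
        = (phases0.contains x || decide (x ∈ S ++ [p])) := by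
      intro x
      have : (S.foldl (fun d q => d.insert q phase) phases0).insert p phase
          = (S ++ [p]).foldl (fun d q => d.insert q phase) phases0 := by
        rw [List.foldl_append]; rfl
      rw [this, pv_contains_foldl_insert]
    -- unfold one outer step
    simp only [List.foldl_cons]
    have hstep : pvOuterStep D phase (S.foldl (fun d q => d.insert q phase) phases0, cnt, nxt) p
        = ((S ++ [p]).foldl (fun d q => d.insert q phase) phases0,
           (L.foldl (pvInnerStep ((S.foldl (fun d q => d.insert q phase) phases0).insert p phase)) (cnt, nxt)).1,
           (L.foldl (pvInnerStep ((S.foldl (fun d q => d.insert q phase) phases0).insert p phase)) (cnt, nxt)).2) := by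
      simp only [pvOuterStep, List.foldl_append, List.foldl_cons, List.foldl_nil]
      rfl
    set phs' := (S.foldl (fun d q => d.insert q phase) phases0).insert p phase with hphs'def
    obtain ⟨i1, i2, i3⟩ := pv_inner_fold L phs' cnt nxt hLnd
    set cnt2 := (L.foldl (pvInnerStep phs') (cnt, nxt)).1 with hcnt2def
    set nxt2 := (L.foldl (pvInnerStep phs') (cnt, nxt)).2 with hnxt2def
    -- helper: cnt as a filter length
    have hcntF : ∀ x ∈ uns, cnt.getD x 0
        = (((pvRem prereqs phases0 x).filter (fun r => !decide (r ∈ S))).length : Int) := by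
      intro x hx
      rw [hcnt x hx, pv_cnt_as_filter S _ hSnd' (pv_rem_nodup prereqs phases0 x)]
    -- new count characterization
    have hcnt' : ∀ x ∈ uns, cnt2.getD x 0 = ((pvRem prereqs phases0 x).length : Int)
        - ((S ++ [p]).countP (fun q => decide (q ∈ pvRem prereqs phases0 x)) : Int) := by
      intro x hx
      rw [i1 x, hcnt x hx, List.countP_append]
      have hxO : x ∈ O := (hON x).mpr (hUN x hx)
      have hiff : x ∈ L ↔ p ∈ pvRem prereqs phases0 x := by
        rw [hmemL x, hpRem x]
        simp [hxO]
      have hone : (List.countP (fun q => decide (q ∈ pvRem prereqs phases0 x)) [p])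
          = if p ∈ pvRem prereqs phases0 x then 1 else 0 := by
        simp [List.countP_cons]
      by_cases hp : p ∈ pvRem prereqs phases0 x
      · rw [hone, if_pos hp, if_pos (hiff.mpr hp)]
        push_cast; omega
      · rw [hone, if_neg hp, if_neg (fun h => hp (hiff.mp h))]
        push_cast; omega
    -- new nxt membership characterization
    have hnxt' : ∀ x, x ∈ nxt2 ↔ (x ∈ uns ∧ x ∉ R ∧ pvRem prereqs phases0 x ≠ [] ∧
        ∀ r ∈ pvRem prereqs phases0 x, r ∈ S ++ [p]) := by
      intro x
      rw [i2 x]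
      constructor
      · rintro (hx | ⟨hxL, hx1, hxc⟩)
        · obtain ⟨h1, h2, h3, h4⟩ := (hnxt x).mp hx
          exact ⟨h1, h2, h3, fun r hr => List.mem_append_left _ (h4 r hr)⟩
        · -- x became ready at the decrement by p
          have hxO : x ∈ O := ((hmemL x).mp hxL).1
          have hxdep : p ∈ pvDeps prereqs x := ((hmemL x).mp hxL).2
          have hxrem : p ∈ pvRem prereqs phases0 x := (hpRem x).mpr hxdep
          have hxN : x ∈ N := (hON x).mp hxO
          have hxc' : phases0.contains x = false ∧ x ∉ S ++ [p] := by
            have := hphsS x ▸ hxc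
            rcases Bool.or_eq_false_iff.mp this with ⟨h1, h2⟩
            exact ⟨h1, by simpa using h2⟩
          have hxuns : x ∈ uns := by
            by_contra hxu
            have := (hsched x).mpr ⟨hxN, hxu⟩
            rw [hxc'.1] at this
            exact Bool.false_ne_true this
          have hxR : x ∉ R := by
            rcases hRC with hall | ⟨m, hm, _⟩
            · intro hxR
              have := ((hall x).mp hxR).2
              rw [this] at hxrem
              simp at hxrem
            · intro hxR
              have hlen : S = [] ∧ p = m ∧ T' = [] := by
                have h1 : S ++ p :: T' = [m] := hRS ▸ hm
                cases S with
                | nil =>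
                  simp at h1
                  exact ⟨rfl, h1.1, h1.2⟩
                | cons a S' =>
                  have := congrArg List.length h1
                  simp at this
              obtain ⟨hS0, hpm, hT0⟩ := hlen
              rw [hm, List.mem_singleton] at hxR
              apply hxc'.2
              rw [hS0, hxR, ← hpm]
              simp
            -- either way contradiction derived above
          refine ⟨hxuns, hxR, fun h => by rw [h] at hxrem; simp at hxrem, ?_⟩
          -- rem ⊆ S ++ [p] from count = 1
          have hF := hcntF x hxuns
          rw [hx1] at hF
          have hFlen : ((pvRem prereqs phases0 x).filter (fun r => !decide (r ∈ S))).length = 1 := by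
            omega
          obtain ⟨y, hy⟩ := List.length_eq_one_iff.mp hFlen
          have hpy : p ∈ [y] := by
            rw [← hy]
            rw [List.mem_filter]
            exact ⟨hxrem, by simp [hpS]⟩
          have hyp : y = p := (List.mem_singleton.mp hpy).symm
          intro r hr
          by_cases hrS : r ∈ S
          · exact List.mem_append_left _ hrS
          · have : r ∈ [y] := by
              rw [← hy, List.mem_filter]
              exact ⟨hr, by simp [hrS]⟩
            rw [List.mem_singleton.mp this, hyp]
            simp
      · rintro ⟨hxuns, hxR, hxne, hxsub⟩
        by_cases hpx : p ∈ pvRem prereqs phases0 x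
        · right
          have hxO : x ∈ O := (hON x).mpr (hUN x hxuns)
          refine ⟨(hmemL x).mpr ⟨hxO, (hpRem x).mp hpx⟩, ?_, ?_⟩
          · -- count is exactly 1
            rw [hcntF x hxuns]
            have : (pvRem prereqs phases0 x).filter (fun r => !decide (r ∈ S)) = [p] := by
              apply pv_eq_singleton _ _ ((pv_rem_nodup prereqs phases0 x).filter _)
              · rw [List.mem_filter]
                exact ⟨hpx, by simp [hpS]⟩
              · intro r hrF
                rw [List.mem_filter] at hrF
                obtain ⟨hr1, hr2⟩ := hrF
                rcases List.mem_append.mp (hxsub r hr1) with h | h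
                · simp at hr2; exact absurd h hr2
                · exact List.mem_singleton.mp h
            rw [this]
            rfl
          · rw [hphsS x]
            have h1 : phases0.contains x = false := by
              rw [Bool.eq_false_iff]
              intro hT
              exact ((hsched x).mp hT).2 hxuns
            have h2 : x ∉ S ++ [p] := by
              intro hx
              rcases List.mem_append.mp hx with h | h
              · exact hxR (hSR x h)
              · exact hxR ((List.mem_singleton.mp h) ▸ hpR)
            simp [h1, h2]
        · left
          rw [hnxt x]
          refine ⟨hxuns, hxR, hxne, ?_⟩
          intro r hr
          rcases List.mem_append.mp (hxsub r hr) with h | h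
          · exact h
          · exact absurd ((List.mem_singleton.mp h) ▸ hr) hpx
    -- nxt2 is Nodup
    have hnd2 : nxt2.Nodup := by
      apply i3 hnd
      intro x hx
      obtain ⟨h1, _, _, h4⟩ := (hnxt x).mp hx
      rw [hcntF x h1]
      have : (pvRem prereqs phases0 x).filter (fun r => !decide (r ∈ S)) = [] := by
        rw [List.filter_eq_nil_iff]
        intro r hr
        simp [h4 r hr]
      rw [this]
      simp
    -- recurse
    have hres := ih (S ++ [p]) cnt2 nxt2 (by rw [hRS, List.append_assoc]; rfl) hcnt' hnxt' hnd2
    rw [hstep]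
    exact hres

-- the fallback pointer: dropping scheduled ids from the sorted suffix lands on min(unscheduled)
lemma pv_dropWhile_min (phases : PySem.Dict Int Int) (N uns : PySem.Set Int)
    (hsched : ∀ p, phases.contains p = true ↔ (p ∈ N ∧ p ∉ uns)) :
    ∀ (suffix : List Int), suffix.Pairwise (· < ·) → (∀ p ∈ suffix, p ∈ N) →
      (∀ p ∈ uns, p ∈ suffix) → uns ≠ [] →
      ∃ m t, suffix.dropWhile (fun p => phases.contains p) = m :: t ∧ m ∈ uns ∧
        (∀ y ∈ uns, y ≠ m → m < y) ∧ (∀ p ∈ uns, p ∈ m :: t) := by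
  intro suffix
  induction suffix with
  | nil =>
    intro _ _ hsub hne
    obtain ⟨x, hx⟩ := List.exists_mem_of_ne_nil _ hne
    exact absurd (hsub x hx) (List.not_mem_nil)
  | cons h s ih =>
    intro hpair hN hsub hne
    rcases List.pairwise_cons.mp hpair with ⟨hlt, hpair'⟩
    by_cases hc : phases.contains h = true
    · have hhu : h ∉ uns := ((hsched h).mp hc).2
      have hsub' : ∀ p ∈ uns, p ∈ s := by
        intro p hp
        rcases List.mem_cons.mp (hsub p hp) with rfl | hs
        · exact absurd hp hhu
        · exact hs
      obtain ⟨m, t, h1, h2, h3, h4⟩ := ih hpair' (fun p hp => hN p (List.mem_cons_of_mem _ hp)) hsub' hne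
      refine ⟨m, t, ?_, h2, h3, h4⟩
      rw [List.dropWhile_cons, if_pos hc]
      exact h1
    · have hhu : h ∈ uns := by
        by_contra hxu
        exact hc ((hsched h).mpr ⟨hN h List.mem_cons_self, hxu⟩)
      refine ⟨h, s, ?_, hhu, ?_, hsub⟩
      · rw [List.dropWhile_cons, if_neg hc]
      · intro y hy hne'
        rcases List.mem_cons.mp (hsub y hy) with rfl | hs
        · exact absurd rfl hne'
        · exact hlt y hs

-- the port's outer-fold lambda is pvOuterStep
lemma pv_stepB_eq (D : PySem.Dict Int (List Int)) (phase : Int) :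
    (fun (st : PySem.Dict Int Int × PySem.Dict Int Int × List Int) p =>
      let phs := st.1.insert p phase
      let cn := (D.getD p []).foldl
        (fun (cn : PySem.Dict Int Int × List Int) q =>
          let c := cn.1.modify q 0 (fun v => v - 1)
          if c.getD q 0 == 0 && !(phs.contains q) then (c, cn.2 ++ [q]) else (c, cn.2))
        (st.2.1, st.2.2)
      (phs, cn.1, cn.2)) = pvOuterStep D phase := rfl

-- after one round, every loop invariant holds again for the two new states
lemma pv_after_round
    (prereqs : List (Int × List Int)) (N : PySem.Set Int) (O : List Int) (D : PySem.Dict Int (List Int))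
    (hON : ∀ x, x ∈ O ↔ x ∈ N) (hOnd : O.Nodup)
    (hD : ∀ d, d ∈ N → D.getD d [] = O.filter (fun p => decide (d ∈ pvDeps prereqs p)))
    (remaining : PySem.Dict Int (PySem.Set Int)) (uns : PySem.Set Int)
    (phases : PySem.Dict Int Int) (count : PySem.Dict Int Int)
    (hUnd : uns.Nodup) (hUN : ∀ p ∈ uns, p ∈ N)
    (hsched : ∀ p, phases.contains p = true ↔ (p ∈ N ∧ p ∉ uns))
    (hsize : phases.size + uns.length = O.length)
    (hrem : ∀ p ∈ uns, remaining.getD p [] = pvRem prereqs phases p)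
    (hcount : ∀ p ∈ uns, count.getD p 0 = ((pvRem prereqs phases p).length : Int))
    (R : List Int) (hRnd : R.Nodup) (hRuns : ∀ p ∈ R, p ∈ uns)
    (hRC : (∀ x, x ∈ R ↔ x ∈ uns ∧ pvRem prereqs phases x = [])
           ∨ (∃ m, R = [m] ∧ ∀ x ∈ uns, pvRem prereqs phases x ≠ []))
    (phase : Int) :
    (R.foldl (pvOuterStep D phase) (phases, count, [])).1 = R.foldl (fun d p => d.insert p phase) phases
    ∧ (PySem.Set.diff uns (PySem.Set.ofList R)).Nodup
    ∧ (∀ p ∈ PySem.Set.diff uns (PySem.Set.ofList R), p ∈ N)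
    ∧ (∀ x, (R.foldl (fun d p => d.insert p phase) phases).contains x = true
        ↔ (x ∈ N ∧ x ∉ PySem.Set.diff uns (PySem.Set.ofList R)))
    ∧ (R.foldl (fun d p => d.insert p phase) phases).size
        + (PySem.Set.diff uns (PySem.Set.ofList R)).length = O.length
    ∧ (∀ p ∈ PySem.Set.diff uns (PySem.Set.ofList R),
        ((PySem.Set.diff uns (PySem.Set.ofList R)).foldl
          (fun d pid => d.modify pid [] (fun s => PySem.Set.diff s (PySem.Set.ofList R))) remaining).getD p []
        = pvRem prereqs (R.foldl (fun d p => d.insert p phase) phases) p)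
    ∧ (∀ p ∈ PySem.Set.diff uns (PySem.Set.ofList R),
        ((R.foldl (pvOuterStep D phase) (phases, count, [])).2.1).getD p 0
        = ((pvRem prereqs (R.foldl (fun d p => d.insert p phase) phases) p).length : Int))
    ∧ PySem.List.sorted ((R.foldl (pvOuterStep D phase) (phases, count, [])).2.2) (fun x => x) false
        = PySem.List.sorted ((PySem.Set.diff uns (PySem.Set.ofList R)).filter
            (fun pid => (((PySem.Set.diff uns (PySem.Set.ofList R)).foldl
              (fun d pid => d.modify pid [] (fun s => PySem.Set.diff s (PySem.Set.ofList R))) remaining).getD pid []).isEmpty))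
            (fun x => x) false := by
  have hfresh : ∀ p ∈ R, phases.contains p = false := by
    intro p hp
    rw [Bool.eq_false_iff]
    intro hT
    exact ((hsched p).mp hT).2 (hRuns p hp)
  -- run the outer fold lemma with S = []
  obtain ⟨o1, o2, o3, o4⟩ := pv_outer_fold_aux prereqs N O D hON hOnd hD uns hUN phases hsched
    R hRnd hRuns hRC phase R [] count []
    (by simp)
    (by intro x hx; rw [hcount x hx]; simp)
    (by
      intro x
      simp only [List.not_mem_nil, false_iff]
      rintro ⟨_, _, hne, hsub⟩
      exact hne (List.eq_nil_iff_forall_not_mem.mpr (fun r hr => (hsub r hr).elim)))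
    List.nodup_nil
  rw [List.foldl_nil] at o1 o2 o3 o4
  -- abbreviations and basic membership facts
  have hmemU' : ∀ x, x ∈ PySem.Set.diff uns (PySem.Set.ofList R) ↔ (x ∈ uns ∧ x ∉ R) := by
    intro x
    rw [pv_mem_diff]
    simp [PySem.Set.mem_ofList]
  have hUnd' : (PySem.Set.diff uns (PySem.Set.ofList R)).Nodup := hUnd.filter _
  have hcont' : ∀ x, (R.foldl (fun d p => d.insert p phase) phases).contains x
      = (phases.contains x || decide (x ∈ R)) := by
    intro x
    rw [pv_contains_foldl_insert]
  -- scheduled-set characterization for the new phases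
  have c4 : ∀ x, (R.foldl (fun d p => d.insert p phase) phases).contains x = true
      ↔ (x ∈ N ∧ x ∉ PySem.Set.diff uns (PySem.Set.ofList R)) := by
    intro x
    rw [hcont', Bool.or_eq_true, decide_eq_true_eq, hsched x, hmemU']
    constructor
    · rintro (⟨h1, h2⟩ | hR)
      · exact ⟨h1, fun hx' => h2 hx'.1⟩
      · exact ⟨hUN x (hRuns x hR), fun hx' => hx'.2 hR⟩
    · rintro ⟨hN', hnu'⟩
      by_cases hxu : x ∈ uns
      · right
        by_contra hxR
        exact hnu' ⟨hxu, hxR⟩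
      · exact Or.inl ⟨hN', hxu⟩
  -- the new remaining sets are exactly rem(phases', ·)
  have hremStep : ∀ p ∈ uns, pvRem prereqs (R.foldl (fun d p => d.insert p phase) phases) p
      = (pvRem prereqs phases p).filter (fun r => !decide (r ∈ R)) := by
    intro p _
    unfold pvRem
    rw [List.filter_filter]
    apply List.filter_congr
    intro q _
    rw [hcont' q]
    simp [Bool.not_or, Bool.and_comm]

  have c6 : ∀ p ∈ PySem.Set.diff uns (PySem.Set.ofList R),
      ((PySem.Set.diff uns (PySem.Set.ofList R)).foldl
        (fun d pid => d.modify pid [] (fun s => PySem.Set.diff s (PySem.Set.ofList R))) remaining).getD p []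
      = pvRem prereqs (R.foldl (fun d p => d.insert p phase) phases) p := by
    intro p hp
    rw [pv_getD_foldl_modify_nodup _ _ _ _ hUnd' hp]
    rw [hrem p ((hmemU' p).mp hp).1, hremStep p ((hmemU' p).mp hp).1]
    unfold PySem.Set.diff
    apply List.filter_congr
    intro q _
    simp [PySem.Set.mem_ofList]
  -- the new counts are the lengths of the new remaining sets
  have c7 : ∀ p ∈ PySem.Set.diff uns (PySem.Set.ofList R),
      ((R.foldl (pvOuterStep D phase) (phases, count, [])).2.1).getD p 0
      = ((pvRem prereqs (R.foldl (fun d p => d.insert p phase) phases) p).length : Int) := by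
    intro p hp
    have hpu : p ∈ uns := ((hmemU' p).mp hp).1
    rw [o2 p hpu, hremStep p hpu,
      pv_cnt_as_filter R _ hRnd (pv_rem_nodup prereqs phases p)]
  -- sizes add up
  have c5 : (R.foldl (fun d p => d.insert p phase) phases).size
      + (PySem.Set.diff uns (PySem.Set.ofList R)).length = O.length := by
    rw [pv_size_foldl_insert R phases phase hfresh hRnd]
    have h1 : (uns.filter (fun x => (PySem.Set.ofList R).contains x)).length
        + (uns.filter (fun x => !(PySem.Set.ofList R).contains x)).length = uns.length :=
      pv_filter_split uns _
    have h2 : uns.filter (fun x => (PySem.Set.ofList R).contains x)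
        = uns.filter (fun x => decide (x ∈ R)) := by
      apply List.filter_congr
      intro q _
      simp [PySem.Set.mem_ofList]
    have h3 : (uns.filter (fun x => decide (x ∈ R))).length
        = (R.filter (fun x => decide (x ∈ uns))).length := pv_cross_count _ _ hUnd hRnd
    have h4 : R.filter (fun x => decide (x ∈ uns)) = R :=
      List.filter_eq_self.mpr (fun a ha => by simp [hRuns a ha])
    have h5 : (PySem.Set.diff uns (PySem.Set.ofList R)).length
        = (uns.filter (fun x => !(PySem.Set.ofList R).contains x)).length := rfl
    rw [h2, h3, h4] at h1
    omega
  -- the next ready layer is the sorted filter of the new pending set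
  have c8 : PySem.List.sorted ((R.foldl (pvOuterStep D phase) (phases, count, [])).2.2) (fun x => x) false
      = PySem.List.sorted ((PySem.Set.diff uns (PySem.Set.ofList R)).filter
          (fun pid => (((PySem.Set.diff uns (PySem.Set.ofList R)).foldl
            (fun d pid => d.modify pid [] (fun s => PySem.Set.diff s (PySem.Set.ofList R))) remaining).getD pid []).isEmpty))
          (fun x => x) false := by
    apply PySem.List.sorted_eq_sorted_of_perm _ _ _ (fun a b h => h)
    rw [List.perm_ext_iff_of_nodup o4 (hUnd'.filter _)]
    intro x
    rw [o3 x, List.mem_filter]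
    constructor
    · rintro ⟨h1, h2, h3, h4⟩
      have hx' : x ∈ PySem.Set.diff uns (PySem.Set.ofList R) := (hmemU' x).mpr ⟨h1, h2⟩
      refine ⟨hx', ?_⟩
      rw [c6 x hx', hremStep x h1]
      rw [List.isEmpty_iff, List.filter_eq_nil_iff]
      intro r hr
      simp [h4 r hr]
    · rintro ⟨hx', hE⟩
      obtain ⟨h1, h2⟩ := (hmemU' x).mp hx'
      rw [c6 x hx', hremStep x h1, List.isEmpty_iff, List.filter_eq_nil_iff] at hE
      have h4 : ∀ r ∈ pvRem prereqs phases x, r ∈ R := by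
        intro r hr
        have := hE r hr
        simpa using this
      refine ⟨h1, h2, ?_, h4⟩
      rcases hRC with hall | ⟨m, hm, hne⟩
      · intro h0
        exact h2 ((hall x).mpr ⟨h1, h0⟩)
      · exact hne x h1
  exact ⟨o1, hUnd', fun p hp => hUN p ((hmemU' p).mp hp).1, c4, c5, c6, c7, c8⟩

-- the main coupling: one round of A's loop corresponds to one round of B's loop
lemma pv_loop_eq (prereqs : List (Int × List Int)) (N : PySem.Set Int) (O : List Int)
    (D : PySem.Dict Int (List Int))
    (hO : O.Pairwise (· < ·)) (hON : ∀ x, x ∈ O ↔ x ∈ N)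
    (hD : ∀ d, d ∈ N → D.getD d [] = O.filter (fun p => decide (d ∈ pvDeps prereqs p))) :
    ∀ (fuel : Nat) (remaining : PySem.Dict Int (PySem.Set Int)) (unscheduled : PySem.Set Int)
      (phase : Int) (phases : PySem.Dict Int Int) (count : PySem.Dict Int Int)
      (ready suffix : List Int),
      unscheduled.Nodup →
      (∀ p ∈ unscheduled, p ∈ N) →
      (∀ p, phases.contains p = true ↔ (p ∈ N ∧ p ∉ unscheduled)) →
      phases.size + unscheduled.length = O.length →
      suffix.Pairwise (· < ·) →
      (∀ p ∈ suffix, p ∈ N) →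
      (∀ p ∈ unscheduled, p ∈ suffix) →
      (∀ p ∈ unscheduled, remaining.getD p [] = pvRem prereqs phases p) →
      (∀ p ∈ unscheduled, count.getD p 0 = ((pvRem prereqs phases p).length : Int)) →
      ready = PySem.List.sorted (unscheduled.filter (fun pid => (remaining.getD pid []).isEmpty)) (fun x => x) false →
      phaseLoopA prereqs fuel remaining unscheduled phase phases
        = phaseLoopB D O.length fuel count ready suffix phase phases := by
  have hOnd : O.Nodup := hO.imp (fun h => ne_of_lt h)
  intro fuel
  induction fuel with
  | zero =>
    intro remaining uns phase phases count ready suffix _ _ _ _ _ _ _ _ _ _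
    rfl
  | succ fuel ih =>
    intro remaining uns phase phases count ready suffix hUnd hUN hsched hsize hsufP hsufN hsufU hrem hcount hready
    by_cases hnil : uns.isEmpty
    · have h0 : uns = [] := List.isEmpty_iff.mp hnil
      have hsz : ¬(phases.size < O.length) := by
        rw [h0] at hsize
        simp at hsize
        omega
      rw [phaseLoopA, phaseLoopB, if_pos hnil, if_neg hsz]
    · have hne : uns ≠ [] := fun h => hnil (by simp [h])
      have hsz : phases.size < O.length := by
        have hlen : uns ≠ [] := hne
        have : 0 < uns.length := List.length_pos_iff.mpr hne
        omega
      rw [phaseLoopA, phaseLoopB, if_neg hnil, if_pos hsz]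
      simp only [← hready, pv_stepB_eq]
      by_cases hrd : ready.isEmpty = true
      · -- cycle fallback round: R = [min unscheduled]
        have hrdnil : ready = [] := List.isEmpty_iff.mp hrd
        have hallne : ∀ x ∈ uns, pvRem prereqs phases x ≠ [] := by
          intro x hx
          have hfe : uns.filter (fun pid => (remaining.getD pid []).isEmpty) = [] := by
            have h1 := hready
            rw [hrdnil] at h1
            exact (PySem.List.sorted_eq_nil_iff _ _ _).mp h1.symm
          have hxf := List.filter_eq_nil_iff.mp hfe x hx
          rw [hrem x hx] at hxf
          intro h
          rw [h] at hxf
          simp at hxf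
        obtain ⟨m, t, hdw, hmu, hmin, hsub'⟩ :=
          pv_dropWhile_min phases N uns hsched suffix hsufP hsufN hsufU hne
        have hminEq : PySem.List.min? uns (fun x => x) = some m := pv_min?_eq_head hmu hmin
        rw [if_pos hrd, if_pos hrd, hminEq, hdw]
        obtain ⟨c1, c2, c3, c4, c5, c6, c7, c8⟩ :=
          pv_after_round prereqs N O D hON hOnd hD remaining uns phases count hUnd hUN hsched
            hsize hrem hcount [m] (List.nodup_singleton m)
            (by intro p hp; rw [List.mem_singleton.mp hp]; exact hmu)
            (Or.inr ⟨m, rfl, hallne⟩) phase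
        have hsl : (m :: t).Sublist suffix := hdw ▸ List.dropWhile_sublist _
        have htake : (m :: t).take 1 = [m] := by simp
        simp only [Option.elim, htake]
        rw [c1]
        exact ih _ _ _ _ _ _ _ c2 c3 c4 c5 (hsufP.sublist hsl)
          (fun p hp => hsufN p (hsl.subset hp)) (fun p hp => hsub' p ((pv_mem_diff _ _ p).mp hp).1)
          c6 c7 c8
      · -- normal round: R = ready, the sorted zero-count layer
        have hRnd : ready.Nodup := by
          rw [hready]
          exact ((PySem.List.sorted_perm _ _ _).nodup_iff).mpr (hUnd.filter _)
        have hRmem : ∀ x, x ∈ ready ↔ (x ∈ uns ∧ pvRem prereqs phases x = []) := by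
          intro x
          rw [hready, PySem.List.mem_sorted, List.mem_filter]
          constructor
          · rintro ⟨h1, h2⟩
            rw [hrem x h1, List.isEmpty_iff] at h2
            exact ⟨h1, h2⟩
          · rintro ⟨h1, h2⟩
            refine ⟨h1, ?_⟩
            rw [hrem x h1, List.isEmpty_iff]
            exact h2
        obtain ⟨c1, c2, c3, c4, c5, c6, c7, c8⟩ :=
          pv_after_round prereqs N O D hON hOnd hD remaining uns phases count hUnd hUN hsched
            hsize hrem hcount ready hRnd (fun p hp => ((hRmem p).mp hp).1)
            (Or.inl hRmem) phase
        rw [if_neg hrd, if_neg hrd, c1]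
        exact ih _ _ _ _ _ _ _ c2 c3 c4 c5 hsufP hsufN
          (fun p hp => hsufU p ((pv_mem_diff _ _ p).mp hp).1) c6 c7 c8

-- the first component of B's build fold is the count dict
lemma pv_cd1 (prereqs : List (Int × List Int)) (nodes : PySem.Set Int) :
    ∀ (l : List Int) (c : PySem.Dict Int Int) (d : PySem.Dict Int (List Int)),
      (l.foldl
        (fun (cd : PySem.Dict Int Int × PySem.Dict Int (List Int)) p =>
          let deps : PySem.Set Int := PySem.Set.ofList ((PySem.Dict.mk prereqs).getD p [])
          let count := cd.1.insert p (PySem.Set.len deps)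
          let dm := deps.foldl
            (fun dd d => if PySem.Set.contains nodes d then dd.modify d [] (fun l => l ++ [p]) else dd) cd.2
          (count, dm)) (c, d)).1
      = l.foldl (fun c p => c.insert p (PySem.Set.len (pvDeps prereqs p))) c := by
  intro l
  induction l with
  | nil => intro c d; rfl
  | cons p l ih => intro c d; exact ih _ _

-- the second component of B's build fold is the dependents dict
lemma pv_cd2 (prereqs : List (Int × List Int)) (nodes : PySem.Set Int) :
    ∀ (l : List Int) (c : PySem.Dict Int Int) (d : PySem.Dict Int (List Int)),
      (l.foldl
        (fun (cd : PySem.Dict Int Int × PySem.Dict Int (List Int)) p =>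
          let deps : PySem.Set Int := PySem.Set.ofList ((PySem.Dict.mk prereqs).getD p [])
          let count := cd.1.insert p (PySem.Set.len deps)
          let dm := deps.foldl
            (fun dd d => if PySem.Set.contains nodes d then dd.modify d [] (fun l => l ++ [p]) else dd) cd.2
          (count, dm)) (c, d)).2
      = l.foldl (fun dd p => (pvDeps prereqs p).foldl
          (fun dd d => if PySem.Set.contains nodes d then dd.modify d [] (fun l => l ++ [p]) else dd) dd) d := by
  intro l
  induction l with
  | nil => intro c d; rfl
  | cons p l ih => intro c d; exact ih _ _

-- appending p to each of its dependents' lists, one prerequisite at a time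
lemma pv_dep_inner (nodes : PySem.Set Int) (p : Int) :
    ∀ (L : List Int), L.Nodup → ∀ (dd : PySem.Dict Int (List Int)) (x : Int),
      (L.foldl (fun dd d => if PySem.Set.contains nodes d then dd.modify d [] (fun l => l ++ [p]) else dd) dd).getD x []
      = dd.getD x [] ++ (if x ∈ L ∧ PySem.Set.contains nodes x = true then [p] else []) := by
  intro L
  induction L with
  | nil => intro _ dd x; simp
  | cons d L' ih =>
    intro hnd dd x
    rcases List.nodup_cons.mp hnd with ⟨hdL, hL'⟩
    simp only [List.foldl_cons]
    by_cases hC : PySem.Set.contains nodes d = true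
    · rw [if_pos hC, ih hL' _ x, PySem.Dict.getD_modify]
      by_cases e : x = d
      · subst e
        rw [if_pos rfl, if_neg (fun h => hdL h.1), if_pos ⟨List.mem_cons_self, hC⟩]
        simp
      · rw [if_neg e]
        congr 1
        simp [List.mem_cons, e]
    · rw [if_neg hC, ih hL' _ x]
      congr 1
      by_cases e : x = d
      · subst e
        rw [if_neg (fun h => hdL h.1), if_neg (fun h => hC h.2)]
      · congr 1
        simp [List.mem_cons, e]

-- the dependents dict built by the outer pass, characterized
lemma pv_dep_outer (prereqs : List (Int × List Int)) (nodes : PySem.Set Int) :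
    ∀ (P : List Int) (dd : PySem.Dict Int (List Int)) (x : Int),
      (P.foldl (fun dd p => (pvDeps prereqs p).foldl
          (fun dd d => if PySem.Set.contains nodes d then dd.modify d [] (fun l => l ++ [p]) else dd) dd) dd).getD x []
      = dd.getD x [] ++ (if PySem.Set.contains nodes x = true
          then P.filter (fun p => decide (x ∈ pvDeps prereqs p)) else []) := by
  intro P
  induction P with
  | nil => intro dd x; simp
  | cons p P' ih =>
    intro dd x
    simp only [List.foldl_cons]
    rw [ih _ x, pv_dep_inner nodes p (pvDeps prereqs p) (PySem.Set.nodup_ofList _) dd x,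
      List.append_assoc]
    congr 1
    by_cases hC : PySem.Set.contains nodes x = true
    · rw [if_pos hC, if_pos hC, List.filter_cons]
      by_cases hx : x ∈ pvDeps prereqs p
      · rw [if_pos ⟨hx, hC⟩]
        simp [hx]
      · rw [if_neg (fun h => hx h.1)]
        simp [hx]
    · rw [if_neg hC, if_neg hC, if_neg (fun h => hC h.2)]
      rfl

-- getD over the '{p: [] for p in order}' initializer is always []
lemma pv_dep0_getD (l : List Int) (x : Int) :
    ((l.foldl (fun d p => d.insert p ([] : List Int)) PySem.Dict.empty)).getD x [] = [] := by
  by_cases hx : x ∈ l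
  · exact pv_getD_foldl_insert_fun (fun _ => []) [] l _ x hx
  · rw [pv_getD_foldl_insert_not_mem (fun _ _ => []) [] l _ x hx]
    rfl

-- ===== VERDICT (by name: the statement is the Claim_ definition above) =====
theorem phase_map_py_spec : Claim_equal_phase_map_py := by
  intro partition_ids prereqs _
  unfold Spec_phase_map_py phase_map_py phase_map_py_alt
  simp only [pv_cd1, pv_cd2]
  apply congrArg PySem.Dict.items
  have hO : (PySem.List.sorted (PySem.Set.ofList partition_ids) (fun x => x) false).Pairwise (· < ·) :=
    PySem.List.sorted_ofList_pairwise_lt partition_ids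
  have hON : ∀ x, x ∈ PySem.List.sorted (PySem.Set.ofList partition_ids) (fun x => x) false
      ↔ x ∈ PySem.Set.ofList partition_ids := by
    intro x
    simp [PySem.List.mem_sorted]
  have hlen : (PySem.Set.ofList partition_ids).length
      = (PySem.List.sorted (PySem.Set.ofList partition_ids) (fun x => x) false).length :=
    (PySem.List.length_sorted _ _ _).symm
  rw [hlen]
  have hD : ∀ d, d ∈ PySem.Set.ofList partition_ids →
      ((PySem.List.sorted (PySem.Set.ofList partition_ids) (fun x => x) false).foldl
        (fun dd p => (pvDeps prereqs p).foldl
          (fun dd d => if PySem.Set.contains (PySem.Set.ofList (PySem.List.sorted (PySem.Set.ofList partition_ids) (fun x => x) false)) d = true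
            then dd.modify d [] (fun l => l ++ [p]) else dd) dd)
        ((PySem.List.sorted (PySem.Set.ofList partition_ids) (fun x => x) false).foldl
          (fun d p => d.insert p ([] : List Int)) PySem.Dict.empty)).getD d []
      = (PySem.List.sorted (PySem.Set.ofList partition_ids) (fun x => x) false).filter
          (fun p => decide (d ∈ pvDeps prereqs p)) := by
    intro d hd
    rw [pv_dep_outer, pv_dep0_getD]
    have hdN : PySem.Set.contains (PySem.Set.ofList (PySem.List.sorted (PySem.Set.ofList partition_ids) (fun x => x) false)) d = true := by
      rw [pv_contains_eq, decide_eq_true_eq, PySem.Set.mem_ofList]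
      exact (hON d).mpr hd
    rw [if_pos hdN]
    rfl
  apply pv_loop_eq prereqs (PySem.Set.ofList partition_ids)
    (PySem.List.sorted (PySem.Set.ofList partition_ids) (fun x => x) false) _ hO hON hD
  · exact PySem.Set.nodup_ofList _
  · exact fun p hp => hp
  · intro p
    simp [PySem.Dict.contains_empty]
  · simp [PySem.Dict.size_empty, PySem.List.length_sorted]
  · exact hO
  · exact fun p hp => (hON p).mp hp
  · exact fun p hp => (hON p).mpr hp
  · intro p hp
    rw [pv_getD_foldl_insert_fun
      (fun pid => PySem.Set.ofList ((PySem.Dict.mk prereqs).getD pid [])) [] partition_ids _ p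
      ((PySem.Set.mem_ofList partition_ids p).mp hp)]
    unfold pvRem pvDeps
    rw [List.filter_eq_self.mpr]
    intro a _
    simp [PySem.Dict.contains_empty]
  · intro p hp
    rw [pv_getD_foldl_insert_fun
      (fun q => PySem.Set.len (pvDeps prereqs q)) 0 _ _ p ((hON p).mpr hp)]
    unfold pvRem
    rw [List.filter_eq_self.mpr (fun a _ => by simp [PySem.Dict.contains_empty])]
    simp [PySem.Set.len]
  · -- the initial ready layer
    symm
    apply PySem.List.sorted_eq_of_perm_of_pairwise_lt
    · have hcongr : (PySem.List.sorted (PySem.Set.ofList partition_ids) (fun x => x) false).filter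
          (fun p => ((PySem.List.sorted (PySem.Set.ofList partition_ids) (fun x => x) false).foldl
            (fun c q => c.insert q (PySem.Set.len (pvDeps prereqs q))) PySem.Dict.empty).getD p 0 == 0)
          = (PySem.List.sorted (PySem.Set.ofList partition_ids) (fun x => x) false).filter
            (fun pid => ((partition_ids.foldl
              (fun d pid => d.insert pid (PySem.Set.ofList ((PySem.Dict.mk prereqs).getD pid [])))
              PySem.Dict.empty).getD pid []).isEmpty) := by
        apply List.filter_congr
        intro q hq
        rw [pv_getD_foldl_insert_fun (fun q => PySem.Set.len (pvDeps prereqs q)) 0 _ _ q hq]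
        rw [pv_getD_foldl_insert_fun
          (fun pid => PySem.Set.ofList ((PySem.Dict.mk prereqs).getD pid [])) [] partition_ids _ q
          ((PySem.Set.mem_ofList partition_ids q).mp ((hON q).mp hq))]
        rw [Bool.eq_iff_iff, beq_iff_eq, List.isEmpty_iff]
        unfold pvDeps
        simp [PySem.Set.len, List.length_eq_zero_iff]
      rw [hcongr]
      exact (PySem.List.sorted_perm _ _ _).filter _
    · exact hO.filter _
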